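-- pv_equiv track=rewrite | github.com/Sidharth-Chunduri/Makistry_Manual_AI | app/services/cadam_style_parameter_extractor.py | _extract_parameter_section
-- ===== SOURCE A (Python) =====
-- from typing import Dict, List, Optional, Union, Tuple
--
-- def _extract_parameter_section(lines: List[str]) -> List[str]:
--     """
--     Extract the parameter section (like CADAM does for OpenSCAD).
--     Stops at the first function/class definition or complex operation.
--     """
--     parameter_lines = []
--
--     for line in lines:
--         stripped = line.strip()
--
--         # Skip empty lines and comments
--         if not stripped or stripped.startswith('#'):
--             continue
--
--         # Skip imports
--         if stripped.startswith('import ') or stripped.startswith('from '):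
--             continue
--
--         # Stop at function definitions, class definitions, or complex operations
--         if (stripped.startswith('def ') or
--             stripped.startswith('class ') or
--             'cq.Workplane' in stripped or
--             '.extrude(' in stripped or
--             '.circle(' in stripped):
--             break
--
--         parameter_lines.append(line)
--
--     return parameter_lines
-- ===== SOURCE B (Python) =====
-- from typing import List
--
--
-- def _classify(line: str) -> int:
--     """Tag a line once: 0 = skipped (empty/comment/import), 2 = boundary, 1 = kept."""
--     s = line.strip()
--     if not s or s.startswith('#') or s.startswith('import ') or s.startswith('from '):
--         return 0
--     if (s.startswith('def ') or s.startswith('class ')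
--             or 'cq.Workplane' in s or '.extrude(' in s or '.circle(' in s):
--         return 2
--     return 1
--
--
-- def _extract_parameter_section(lines: List[str]) -> List[str]:
--     # Staged pipeline over a precomputed tag table: classify every line once,
--     # locate the boundary by an index lookup on the tags, then select the
--     # kept lines by pairing lines with the truncated tag table.
--     tags = list(map(_classify, lines))
--     cut = tags.index(2) if 2 in tags else len(lines)
--     return [l for l, t in zip(lines, tags[:cut]) if t == 1]
-- ===== Notes on version B (the rewrite author's own statement) =====
-- stated objective: alternative
-- what changed: Replaced A's single interleaved loop (skip/continue, break, append) by a staged pipeline over a precomputed three-way tag table: map every line once to a tag 0/1/2, find the boundary with tags.index(2), then select kept lines by zipping lines with the truncated tags.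
import Mathlib
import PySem

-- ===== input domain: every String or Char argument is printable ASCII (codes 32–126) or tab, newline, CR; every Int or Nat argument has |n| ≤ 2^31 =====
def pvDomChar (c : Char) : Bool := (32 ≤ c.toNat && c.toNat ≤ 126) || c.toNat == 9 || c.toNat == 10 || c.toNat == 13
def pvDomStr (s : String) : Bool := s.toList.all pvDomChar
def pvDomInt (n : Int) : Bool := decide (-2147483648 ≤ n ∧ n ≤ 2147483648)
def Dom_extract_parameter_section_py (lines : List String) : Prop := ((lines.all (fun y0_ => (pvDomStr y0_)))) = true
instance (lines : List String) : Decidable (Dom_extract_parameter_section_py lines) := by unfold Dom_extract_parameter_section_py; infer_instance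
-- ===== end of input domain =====

-- B replaces A's single interleaved loop by a staged pipeline over a precomputed tag table
-- (classify each line once to 0/1/2, cut at the first tag 2 via an index lookup, select by tag); same cost.


-- ===== PORT A =====
-- loop over lines with accumulator parameter_lines; 'break' returns the accumulator
def pvGoA : List String → List String → List String
  | acc, [] => acc
  | acc, l :: rest =>
    let stripped := PySem.Str.strip l
    if stripped == "" || PySem.Str.startswith stripped "#" then
      pvGoA acc rest
    else if PySem.Str.startswith stripped "import " || PySem.Str.startswith stripped "from " then
      pvGoA acc rest
    else if PySem.Str.startswith stripped "def " || PySem.Str.startswith stripped "class " ||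
            PySem.Str.isIn "cq.Workplane" stripped || PySem.Str.isIn ".extrude(" stripped ||
            PySem.Str.isIn ".circle(" stripped then
      acc
    else
      pvGoA (acc ++ [l]) rest

def extract_parameter_section_py (lines : List String) : List String :=
  pvGoA [] lines

-- ===== PORT B =====
-- classify a line once: 0 = skipped, 2 = boundary, 1 = kept
def pvClassify (line : String) : Nat :=
  if PySem.Str.strip line == "" || PySem.Str.startswith (PySem.Str.strip line) "#" ||
      PySem.Str.startswith (PySem.Str.strip line) "import " || PySem.Str.startswith (PySem.Str.strip line) "from " then 0
  else if PySem.Str.startswith (PySem.Str.strip line) "def " || PySem.Str.startswith (PySem.Str.strip line) "class " ||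
      PySem.Str.isIn "cq.Workplane" (PySem.Str.strip line) || PySem.Str.isIn ".extrude(" (PySem.Str.strip line) ||
      PySem.Str.isIn ".circle(" (PySem.Str.strip line) then 2
  else 1

-- boundary position: index of the first stop tag, or the list length if none
def pvCut (tags : List Nat) (n : Nat) : Nat :=
  match PySem.List.index? tags 2 with
  | some i => i
  | none => n

def extract_parameter_section_py_alt (lines : List String) : List String :=
  ((lines.zip ((lines.map pvClassify).take
      (pvCut (lines.map pvClassify) lines.length))).filter (fun p => p.2 == 1)).map Prod.fst

-- ===== PRECONDITION & SPEC =====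
def Spec_extract_parameter_section_py (lines : List String) (out : List String) : Prop := out = extract_parameter_section_py_alt lines
instance (lines : List String) (out : List String) : Decidable (Spec_extract_parameter_section_py lines out) := by unfold Spec_extract_parameter_section_py; infer_instance

-- ===== CLAIM (what is proved, stated in full; the proofs are below) =====
def Claim_equal_extract_parameter_section_py : Prop := ∀ (lines : List String), Dom_extract_parameter_section_py lines → Spec_extract_parameter_section_py lines (extract_parameter_section_py lines)

-- ===== LEMMAS AND PROOFS =====
-- the classifier takes only the values 0, 1, 2
theorem pvClassify_cases (l : String) :
    pvClassify l = 0 ∨ pvClassify l = 1 ∨ pvClassify l = 2 := by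
  unfold pvClassify; split_ifs <;> simp

-- A's loop body, phrased through B's classifier (they test the same stripped line).
theorem pvGoA_cons (acc : List String) (l : String) (rest : List String) :
    pvGoA acc (l :: rest) =
      if pvClassify l = 0 then pvGoA acc rest
      else if pvClassify l = 2 then acc
      else pvGoA (acc ++ [l]) rest := by
  rw [pvGoA]
  unfold pvClassify
  by_cases h1 : (PySem.Str.strip l == "") = true <;>
  by_cases h2 : PySem.Str.startswith (PySem.Str.strip l) "#" = true <;>
  by_cases h3 : PySem.Str.startswith (PySem.Str.strip l) "import " = true <;>
  by_cases h4 : PySem.Str.startswith (PySem.Str.strip l) "from " = true <;>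
  by_cases h5 : (PySem.Str.startswith (PySem.Str.strip l) "def " || PySem.Str.startswith (PySem.Str.strip l) "class " ||
      PySem.Str.isIn "cq.Workplane" (PySem.Str.strip l) || PySem.Str.isIn ".extrude(" (PySem.Str.strip l) ||
      PySem.Str.isIn ".circle(" (PySem.Str.strip l)) = true <;>
  simp_all

-- B's pipeline on a cons, by the value of the head's tag.
theorem alt_cons (l : String) (rest : List String) :
    extract_parameter_section_py_alt (l :: rest) =
      if pvClassify l = 2 then []
      else if pvClassify l = 1 then l :: extract_parameter_section_py_alt rest
      else extract_parameter_section_py_alt rest := by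
  unfold extract_parameter_section_py_alt pvCut
  by_cases h2 : pvClassify l = 2
  · rw [List.map_cons, h2, PySem.List.index?_cons_self]
    simp
  · rw [List.map_cons, PySem.List.index?_cons_of_ne _ h2]
    have htake : (rest.map pvClassify).take rest.length = rest.map pvClassify := by simp
    cases hidx : PySem.List.index? (rest.map pvClassify) 2 with
    | none =>
        simp only [Option.map_none, List.length_cons, List.take_succ_cons, htake,
          List.zip_cons_cons, List.filter_cons]
        by_cases h1 : pvClassify l = 1 <;> simp_all
    | some i =>
        simp only [Option.map_some, List.take_succ_cons, List.zip_cons_cons, List.filter_cons]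
        by_cases h1 : pvClassify l = 1 <;> simp_all

-- A's loop with accumulator acc equals acc ++ (B's staged result), for every acc.
theorem pvGoA_eq_alt (ls : List String) :
    ∀ acc, pvGoA acc ls = acc ++ extract_parameter_section_py_alt ls := by
  induction ls with
  | nil => intro acc; simp [pvGoA, extract_parameter_section_py_alt]
  | cons l rest ih =>
    intro acc
    rw [pvGoA_cons, alt_cons]
    rcases pvClassify_cases l with h | h | h
    · simp [h, ih acc]
    · simp [h]
      rw [ih (acc ++ [l])]
      simp
    · simp [h]

-- ===== VERDICT (by name: the statement is the Claim_ definition above) =====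
theorem extract_parameter_section_py_spec : Claim_equal_extract_parameter_section_py := by
  intro lines _
  unfold Spec_extract_parameter_section_py extract_parameter_section_py
  simpa using pvGoA_eq_alt lines []
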